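-- pv_equiv track=rewrite | github.com/m32/endesive | endesive/pdf/PyPDF2_annotate/util/text.py | unshift_token
-- ===== SOURCE A (Python) =====
-- def unshift_token(text):
--     """Remove a token from the front of a string.
--
--     :param str text:
--     :returns: {'text': str, 'separator': str, 'remainder': str}
--     """
--     if len(text) == 0:
--         return {'text': text, 'separator': '', 'remainder': ''}
--
--     token = ''
--     for i in range(0, len(text)):
--         char = text[i]
--         if (char == ' ' and (len(token) >= 1 and token[i - 1] == ' ')):
--             token += char
--         elif (char == ' ' and len(token) == 0):
--             token += char
--         elif char == ' ':
--             return {'text': token, 'separator': ' ', 'remainder': text[i + 1:]}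
--         elif char == '\n':
--             return {
--                 'text': token,
--                 'separator': '\n',
--                 'remainder': text[i + 1:],
--             }
--         elif (len(token) >= 1 and token[i - 1] == ' '):
--             return {
--                 'text': token,
--                 'separator': '',
--                 'remainder': text[len(token):],
--             }
--         else:
--             token += char
--
--     return {'text': token, 'separator': '', 'remainder': ''}
-- ===== SOURCE B (Python) =====
-- def unshift_token(text):
--     if not text:
--         return {'text': text, 'separator': '', 'remainder': ''}
--     n = len(text)
--     if text[0] == ' ':
--         j = 0
--         while j < n and text[j] == ' ':
--             j += 1
--         if j == n:
--             return {'text': text, 'separator': '', 'remainder': ''}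
--         if text[j] == '\n':
--             return {'text': text[:j], 'separator': '\n', 'remainder': text[j+1:]}
--         return {'text': text[:j], 'separator': '', 'remainder': text[j:]}
--     j = 0
--     while j < n and text[j] not in (' ', '\n'):
--         j += 1
--     if j == n:
--         return {'text': text, 'separator': '', 'remainder': ''}
--     return {'text': text[:j], 'separator': text[j], 'remainder': text[j+1:]}
-- ===== Notes on version B (the rewrite author's own statement) =====
-- stated objective: simpler
-- what changed: Replaces A's single accumulating character loop (with its token[i-1] back-reference and per-character token append) by a branch on the first character plus one forward scan and slicing: a space-run scan when the text starts with a space, otherwise a scan to the first separator.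
import Mathlib
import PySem

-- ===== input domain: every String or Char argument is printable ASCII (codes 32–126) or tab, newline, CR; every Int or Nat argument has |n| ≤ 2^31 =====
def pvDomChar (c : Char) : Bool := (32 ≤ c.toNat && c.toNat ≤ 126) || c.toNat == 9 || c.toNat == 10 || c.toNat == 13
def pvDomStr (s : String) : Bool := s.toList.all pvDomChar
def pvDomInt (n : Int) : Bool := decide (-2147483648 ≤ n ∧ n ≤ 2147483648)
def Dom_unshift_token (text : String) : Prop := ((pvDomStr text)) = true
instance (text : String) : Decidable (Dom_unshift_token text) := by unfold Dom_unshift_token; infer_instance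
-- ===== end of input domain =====

-- B replaces A's single accumulating character loop by a branch on the first
-- character plus one forward scan and slicing (objective: simpler).


-- the returned dict {'text': …, 'separator': …, 'remainder': …} as an assoc list
def pvMkOut (t s r : List Char) : List (String × String) :=
  [("text", String.ofList t), ("separator", String.ofList s), ("remainder", String.ofList r)]

-- ===== PORT A =====
-- A's for-loop over i with the accumulated `token`; recursion is on the
-- yet-unscanned suffix `rest` = cs.drop i (invariant maintained by the calls).
-- token[i-1] is PySem.List.pyGetD (in range whenever len(token) ≥ 1, since
-- len(token) = i at every iteration); text[i+1:] is `rest` itself and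
-- text[len(token):] is cs.drop token.length (nonnegative slices).
def pvALoop (cs : List Char) : Nat → List Char → List Char → List (String × String)
  | _, token, [] => pvMkOut token [] []
  | i, token, char :: rest =>
    if char = ' ' ∧ (1 ≤ token.length ∧ PySem.List.pyGetD token ((i : Int) - 1) 'x' = ' ') then
      pvALoop cs (i + 1) (token ++ [char]) rest
    else if char = ' ' ∧ token.length = 0 then
      pvALoop cs (i + 1) (token ++ [char]) rest
    else if char = ' ' then
      pvMkOut token [' '] rest
    else if char = '\n' then
      pvMkOut token ['\n'] rest
    else if 1 ≤ token.length ∧ PySem.List.pyGetD token ((i : Int) - 1) 'x' = ' ' then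
      pvMkOut token [] (cs.drop token.length)
    else
      pvALoop cs (i + 1) (token ++ [char]) rest

def unshift_token (text : String) : List (String × String) :=
  let cs := text.toList
  if cs.length = 0 then pvMkOut cs [] []
  else pvALoop cs 0 [] cs

-- ===== PORT B =====
-- Source B's first while loop: count of consecutive leading spaces
def pvCountSpaces : List Char → Nat
  | [] => 0
  | c :: r => if c = ' ' then pvCountSpaces r + 1 else 0

-- Source B's second while loop: length of the prefix with no ' ' and no '\n'
def pvCountToken : List Char → Nat
  | [] => 0
  | c :: r => if c ≠ ' ' ∧ c ≠ '\n' then pvCountToken r + 1 else 0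

def unshift_token_alt (text : String) : List (String × String) :=
  let cs := text.toList
  match cs with
  | [] => pvMkOut [] [] []
  | c0 :: _ =>
    if c0 = ' ' then
      let j := pvCountSpaces cs
      if j = cs.length then pvMkOut cs [] []
      else if cs.getD j 'x' = '\n' then pvMkOut (cs.take j) ['\n'] (cs.drop (j + 1))
      else pvMkOut (cs.take j) [] (cs.drop j)
    else
      let j := pvCountToken cs
      if j = cs.length then pvMkOut cs [] []
      else pvMkOut (cs.take j) [cs.getD j 'x'] (cs.drop (j + 1))

-- ===== PRECONDITION & SPEC =====
def Spec_unshift_token (text : String) (out : List (String × String)) : Prop := out = unshift_token_alt text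
instance (text : String) (out : List (String × String)) : Decidable (Spec_unshift_token text out) := by unfold Spec_unshift_token; infer_instance

-- ===== CLAIM (what is proved, stated in full; the proofs are below) =====
def Claim_equal_unshift_token : Prop := ∀ (text : String), Dom_unshift_token text → Spec_unshift_token text (unshift_token text)

-- ===== LEMMAS AND PROOFS =====
-- ===== proof helpers: the two branch values of B as standalone functions =====
def pvSpaceB (cs : List Char) : List (String × String) :=
  let j := pvCountSpaces cs
  if j = cs.length then pvMkOut cs [] []
  else if cs.getD j 'x' = '\n' then pvMkOut (cs.take j) ['\n'] (cs.drop (j + 1))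
  else pvMkOut (cs.take j) [] (cs.drop j)

def pvTokB (tok rest : List Char) : List (String × String) :=
  let j := pvCountToken rest
  if j = rest.length then pvMkOut (tok ++ rest) [] []
  else pvMkOut (tok ++ rest.take j) [rest.getD j 'x'] (rest.drop (j + 1))

lemma countSpaces_repl (k : Nat) (rest : List Char) :
    pvCountSpaces (List.replicate k ' ' ++ rest) = k + pvCountSpaces rest := by
  induction k with
  | zero => simp
  | succ n ih => simp [List.replicate_succ, pvCountSpaces, ih]; omega

lemma countSpaces_repl' (k : Nat) : pvCountSpaces (List.replicate k ' ') = k := by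
  simpa [pvCountSpaces] using countSpaces_repl k []

lemma drop_repl (k j : Nat) (rest : List Char) :
    (List.replicate k ' ' ++ rest).drop (k + j) = rest.drop j := by
  simpa using List.drop_length_add_append (l₁ := List.replicate k ' ') (l₂ := rest) (i := j)

lemma getD_repl_mid (k : Nat) (c : Char) (r : List Char) (d : Char) :
    (List.replicate k ' ' ++ c :: r).getD k d = c := by
  simp [List.getD_eq_getElem?_getD, List.getElem?_append_right]

lemma getD_repl_spaces (k : Nat) (hk : 1 ≤ k) :
    PySem.List.pyGetD (List.replicate k ' ') ((k : Int) - 1) 'x' = ' ' := by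
  have hm := PySem.List.pyGetD_mem (xs := List.replicate k ' ') (i := (k : Int) - 1) (d := 'x')
    (by simp [PySem.Raise.InRange]; omega)
  exact List.eq_of_mem_replicate hm

-- A's loop in the leading-space regime equals B's space branch
lemma lemS (rest : List Char) : ∀ k, 1 ≤ k →
    pvALoop (List.replicate k ' ' ++ rest) k (List.replicate k ' ') rest =
      pvSpaceB (List.replicate k ' ' ++ rest) := by
  induction rest with
  | nil =>
    intro k hk
    simp [pvALoop, pvSpaceB, countSpaces_repl']
  | cons c r ih =>
    intro k hk
    have hget := getD_repl_spaces k hk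
    have hj : pvCountSpaces (List.replicate k ' ' ++ c :: r) = k + pvCountSpaces (c :: r) :=
      countSpaces_repl k _
    by_cases hc : c = ' '
    · subst hc
      rw [pvALoop, if_pos ⟨rfl, by simpa using hk, hget⟩]
      have hcs : List.replicate k ' ' ++ ' ' :: r = List.replicate (k + 1) ' ' ++ r := by
        simp [List.replicate_succ']
      rw [show List.replicate k ' ' ++ [' '] = List.replicate (k + 1) ' ' from
        (List.replicate_succ' ..).symm, hcs]
      exact ih (k + 1) (by omega)
    · by_cases hn : c = '\n'
      · subst hn
        rw [pvALoop, if_neg (by simp), if_neg (by simp), if_neg (by simp), if_pos rfl]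
        simp only [pvSpaceB, hj]
        rw [show pvCountSpaces ('\n' :: r) = 0 from by simp [pvCountSpaces]]
        rw [if_neg (by intro h; simp at h), if_pos (by simp [getD_repl_mid])]
        have := drop_repl k 1 ('\n' :: r)
        simp_all
      · rw [pvALoop, if_neg (by simp [hc]), if_neg (by simp [hc]), if_neg (by simp [hc]),
          if_neg (by simp [hn]), if_pos ⟨by simpa using hk, by simpa using hget⟩]
        simp only [pvSpaceB, hj]
        rw [show pvCountSpaces (c :: r) = 0 from by simp [pvCountSpaces, hc]]
        rw [if_neg (by intro h; simp at h), if_neg (by simp [getD_repl_mid, hn])]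
        have := drop_repl k 0 (c :: r)
        simp_all

-- A's loop in the token regime equals B's token branch
lemma lemT (rest : List Char) : ∀ tok : List Char, tok ≠ [] →
    (∀ c ∈ tok, ¬(c = ' ' ∨ c = '\n')) →
    pvALoop (tok ++ rest) tok.length tok rest = pvTokB tok rest := by
  induction rest with
  | nil =>
    intro tok _ _
    simp [pvALoop, pvTokB, pvCountToken]
  | cons c r ih =>
    intro tok htok hsep
    have hlast : PySem.List.pyGetD tok ((tok.length : Int) - 1) 'x' ∈ tok := by
      apply PySem.List.pyGetD_mem
      have : 0 < tok.length := List.length_pos_iff.mpr htok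
      simp [PySem.Raise.InRange]; omega
    have hne : ¬ PySem.List.pyGetD tok ((tok.length : Int) - 1) 'x' = ' ' := by
      intro h; exact (hsep _ hlast) (Or.inl h)
    by_cases hc : c = ' '
    · subst hc
      rw [pvALoop, if_neg (by simp [hne]), if_neg (by simp [htok]), if_pos rfl]
      simp [pvTokB, pvCountToken]
    · by_cases hn : c = '\n'
      · subst hn
        rw [pvALoop, if_neg (by simp), if_neg (by simp), if_neg (by simp), if_pos rfl]
        simp [pvTokB, pvCountToken]
      · rw [pvALoop, if_neg (by simp [hc]), if_neg (by simp [hc]), if_neg (by simp [hc]),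
          if_neg (by simp [hn]), if_neg (by simp [hne])]
        rw [show tok ++ c :: r = (tok ++ [c]) ++ r from by simp,
          show tok.length + 1 = (tok ++ [c]).length from by simp]
        rw [ih (tok ++ [c]) (by simp) (by
          intro x hx
          rcases List.mem_append.mp hx with h | h
          · exact hsep x h
          · simp at h; subst h; simp [hc, hn])]
        simp [pvTokB, pvCountToken, hc, hn]


lemma main_eq (text : String) : unshift_token text = unshift_token_alt text := by
  unfold unshift_token unshift_token_alt
  cases hcs : text.toList with
  | nil => simp
  | cons c0 rest =>
    simp only [List.length_cons, Nat.succ_ne_zero, if_false]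
    by_cases hc : c0 = ' '
    · subst hc
      rw [pvALoop]
      rw [if_neg (by simp), if_pos (by simp)]
      have h := lemS rest 1 le_rfl
      simpa [pvSpaceB] using h
    · by_cases hn : c0 = '\n'
      · subst hn
        rw [pvALoop]
        rw [if_neg (by simp), if_neg (by simp), if_neg (by simp), if_pos rfl, if_neg (by simp)]
        simp [pvCountToken]
      · rw [pvALoop]
        rw [if_neg (by simp [hc]), if_neg (by simp [hc]), if_neg (by simp [hc]),
          if_neg (by simp [hn]), if_neg (by simp)]
        have h := lemT rest [c0] (by simp) (by simp [hc, hn])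
        rw [show ([c0] : List Char) ++ rest = c0 :: rest from rfl] at h
        rw [show (0 : Nat) + 1 = ([c0] : List Char).length from rfl, show ([] : List Char) ++ [c0] = [c0] from rfl, h]
        rw [if_neg hc]
        by_cases hj : pvCountToken rest = rest.length
        · simp [pvTokB, pvCountToken, hc, hn, hj]
        · simp [pvTokB, pvCountToken, hc, hn, hj]

-- ===== VERDICT (by name: the statement is the Claim_ definition above) =====
theorem unshift_token_spec : Claim_equal_unshift_token := by
  intro text _
  exact main_eq text
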